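-- pv_equiv track=rewrite | github.com/monkey1208/Object-Relation-Attention-for-im2p | misc/rel_utils.py | get_correlation
-- ===== SOURCE A (Python) =====
-- def get_correlation(obj_list, clses, rel_list):
--     # check the correlation between objects in obj_list
--     triplets = []
--     for sub_idx, (sub_cls, sub) in enumerate(zip(clses, obj_list)):
--         for _sub in sub:
--             for obj_idx, (obj_cls, obj) in enumerate(zip(clses, obj_list)):
--                 if sub_cls == obj_cls: continue
--                 for _obj in obj:
--                     pred = rel_list.get((_sub, _obj), -1)
--                     if pred != -1:
--                         triplets.append([sub_idx, pred, obj_idx])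
--     return triplets
-- ===== SOURCE B (Python) =====
-- def get_correlation(obj_list, clses, rel_list):
--     # Relation-centric rewrite: index element occurrences once, visit only actual
--     # relations, then sort candidates to restore A's nested-loop emission order.
--     occ = {}
--     for i, (cls, elems) in enumerate(zip(clses, obj_list)):
--         for p, v in enumerate(elems):
--             occ.setdefault(v, []).append((i, p, cls))
--     cand = []
--     for (a, b), pred in rel_list.items():
--         if pred == -1:
--             continue
--         for si, sp, scls in occ.get(a, []):
--             for oi, op, ocls in occ.get(b, []):
--                 if scls != ocls:
--                     cand.append((si, sp, oi, op, pred))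
--     cand.sort(key=lambda t: t[:4])
--     return [[si, pred, oi] for si, sp, oi, op, pred in cand]
-- ===== Notes on version B (the rewrite author's own statement) =====
-- stated objective: faster
-- what changed: A scans every (subject element, object element) pair in four nested loops doing a dict lookup per pair; B builds an occurrence index value->[(idx,pos,cls)] once, iterates only the actual relations to collect matching (si,sp,oi,op,pred) candidates, and sorts them by (si,sp,oi,op) to restore A's emission order. (Pre_ only excludes duplicate-key association lists, which represent no Python dict input.)
import Mathlib
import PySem

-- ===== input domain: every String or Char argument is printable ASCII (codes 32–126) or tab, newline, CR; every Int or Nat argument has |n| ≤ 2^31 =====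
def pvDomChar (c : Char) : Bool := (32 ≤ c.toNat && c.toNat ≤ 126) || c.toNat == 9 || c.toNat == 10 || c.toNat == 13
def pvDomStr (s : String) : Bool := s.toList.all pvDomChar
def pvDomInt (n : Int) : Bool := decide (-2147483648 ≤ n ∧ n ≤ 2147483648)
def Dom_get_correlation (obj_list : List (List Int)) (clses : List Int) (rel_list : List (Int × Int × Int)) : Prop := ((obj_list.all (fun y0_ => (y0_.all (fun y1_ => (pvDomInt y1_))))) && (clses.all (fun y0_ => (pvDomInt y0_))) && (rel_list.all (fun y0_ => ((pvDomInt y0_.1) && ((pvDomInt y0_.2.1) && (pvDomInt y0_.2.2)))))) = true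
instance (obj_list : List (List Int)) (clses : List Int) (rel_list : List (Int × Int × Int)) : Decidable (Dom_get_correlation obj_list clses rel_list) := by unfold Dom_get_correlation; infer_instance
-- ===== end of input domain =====

-- B replaces A's all-pairs scan of subject/object elements by an occurrence index built once
-- and a relation-centric collection sorted back into A's emission order (return value only;
-- neither program mutates its arguments).

-- ===== PORT A =====
-- rel_list.get((_sub, _obj), -1): first-match lookup in the association list of the dict
def relGetD (rel : List (Int × Int × Int)) (k : Int × Int) (dflt : Int) : Int :=
  match rel.find? (fun e => (e.1, e.2.1) == k) with
  | some e => e.2.2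
  | none => dflt

def get_correlation (obj_list : List (List Int)) (clses : List Int) (rel_list : List (Int × Int × Int)) : List (List Int) :=
  (PySem.List.enumerate (clses.zip obj_list)).foldl (fun acc s =>
    s.2.2.foldl (fun acc a =>
      (PySem.List.enumerate (clses.zip obj_list)).foldl (fun acc o =>
        if s.2.1 = o.2.1 then acc
        else o.2.2.foldl (fun acc b =>
          let pred := relGetD rel_list (a, b) (-1)
          if pred ≠ -1 then acc ++ [[s.1, pred, o.1]] else acc) acc) acc) acc) []

-- ===== PORT B =====
-- the sort key of Source B: Python's lexicographic tuple order on t[:4]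
def pvKey (t : Int × Int × Int × Int × Int) : Lex (Int × Lex (Int × Lex (Int × Int))) :=
  toLex (t.1, toLex (t.2.1, toLex (t.2.2.1, t.2.2.2.1)))

-- occ: value -> list of (index, position, cls) occurrences, built once (setdefault/append)
def pvOccDict (obj_list : List (List Int)) (clses : List Int) : PySem.Dict Int (List (Int × Int × Int)) :=
  (PySem.List.enumerate (clses.zip obj_list)).foldl (fun d s =>
    (PySem.List.enumerate s.2.2).foldl (fun d pv =>
      d.insert pv.2 (d.getD pv.2 [] ++ [(s.1, pv.1, s.2.1)])) d) PySem.Dict.empty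

-- cand: one (si, sp, oi, op, pred) per actual relation match
def pvCandList (obj_list : List (List Int)) (clses : List Int) (rel_list : List (Int × Int × Int)) : List (Int × Int × Int × Int × Int) :=
  rel_list.foldl (fun c e =>
    if e.2.2 = -1 then c
    else ((pvOccDict obj_list clses).getD e.1 []).foldl (fun c s =>
      ((pvOccDict obj_list clses).getD e.2.1 []).foldl (fun c o =>
        if s.2.2 ≠ o.2.2 then c ++ [(s.1, s.2.1, o.1, o.2.1, e.2.2)] else c) c) c) []

def get_correlation_alt (obj_list : List (List Int)) (clses : List Int) (rel_list : List (Int × Int × Int)) : List (List Int) :=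
  (PySem.List.sorted (pvCandList obj_list clses rel_list) pvKey).map (fun t => [t.1, t.2.2.2.2, t.2.2.1])

-- ===== PRECONDITION & SPEC =====
-- Pre_ excludes association lists whose (sub, obj) keys repeat: rel_list is a Python dict, whose
-- keys are necessarily distinct, so a duplicate-key list represents no Python input at all.
def Pre_get_correlation (obj_list : List (List Int)) (clses : List Int) (rel_list : List (Int × Int × Int)) : Prop :=
  (rel_list.map (fun e => (e.1, e.2.1))).Nodup
instance (obj_list : List (List Int)) (clses : List Int) (rel_list : List (Int × Int × Int)) : Decidable (Pre_get_correlation obj_list clses rel_list) := by unfold Pre_get_correlation; infer_instance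

def pvWitness_get_correlation : List (List Int) × List Int × (List (Int × Int × Int)) :=
  ([[1, 2], [3]], [0, 1], [(1, 3, 5), (2, 3, -1)])

def Spec_get_correlation (obj_list : List (List Int)) (clses : List Int) (rel_list : List (Int × Int × Int)) (out : List (List Int)) : Prop := out = get_correlation_alt obj_list clses rel_list
instance (obj_list : List (List Int)) (clses : List Int) (rel_list : List (Int × Int × Int)) (out : List (List Int)) : Decidable (Spec_get_correlation obj_list clses rel_list out) := by unfold Spec_get_correlation; infer_instance

-- ===== CLAIM (what is proved, stated in full; the proofs are below) =====
def Claim_equal_get_correlation : Prop := ∀ (obj_list : List (List Int)) (clses : List Int) (rel_list : List (Int × Int × Int)), Dom_get_correlation obj_list clses rel_list → Pre_get_correlation obj_list clses rel_list → Spec_get_correlation obj_list clses rel_list (get_correlation obj_list clses rel_list)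

-- ===== LEMMAS AND PROOFS =====

-- the canonical tuple list (si, sp, oi, op, pred) in A's emission order
def pvB4 (rel : List (Int × Int × Int)) (a si sp oi : Int) (qw : Int × Int) : List (Int × Int × Int × Int × Int) :=
  if relGetD rel (a, qw.2) (-1) ≠ -1 then [(si, sp, oi, qw.1, relGetD rel (a, qw.2) (-1))] else []
def pvB3 (rel : List (Int × Int × Int)) (a si sp scls : Int) (o : Int × Int × List Int) : List (Int × Int × Int × Int × Int) :=
  if scls = o.2.1 then [] else (PySem.List.enumerate o.2.2).flatMap (pvB4 rel a si sp o.1)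
def pvB2 (obj_list : List (List Int)) (clses : List Int) (rel : List (Int × Int × Int)) (si scls : Int) (pv : Int × Int) : List (Int × Int × Int × Int × Int) :=
  (PySem.List.enumerate (clses.zip obj_list)).flatMap (pvB3 rel pv.2 si pv.1 scls)
def pvB1 (obj_list : List (List Int)) (clses : List Int) (rel : List (Int × Int × Int)) (s : Int × Int × List Int) : List (Int × Int × Int × Int × Int) :=
  (PySem.List.enumerate s.2.2).flatMap (pvB2 obj_list clses rel s.1 s.2.1)
def pvT (obj_list : List (List Int)) (clses : List Int) (rel : List (Int × Int × Int)) : List (Int × Int × Int × Int × Int) :=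
  (PySem.List.enumerate (clses.zip obj_list)).flatMap (pvB1 obj_list clses rel)

def pvProj (t : Int × Int × Int × Int × Int) : List Int := [t.1, t.2.2.2.2, t.2.2.1]

-- generic: a foldl that appends blocks is a flatMap
lemma pv_foldl_flat {α β : Type} (f : List β → α → List β) (g : α → List β)
    (h : ∀ acc x, f acc x = acc ++ g x) (l : List α) (acc : List β) :
    l.foldl f acc = acc ++ l.flatMap g := by
  have hf : f = fun acc x => acc ++ g x := funext fun a => funext fun x => h a x
  rw [hf]; exact PySem.List.foldl_append_eq_flatMap g l acc

-- ===== A-link: get_correlation = pvT.map pvProj =====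
lemma pv_lvl4 (rel : List (Int × Int × Int)) (a si sp oi : Int) (objl : List Int) (k : Int) (acc : List (List Int)) :
    objl.foldl (fun acc b =>
      let pred := relGetD rel (a, b) (-1)
      if pred ≠ -1 then acc ++ [[si, pred, oi]] else acc) acc
    = acc ++ ((PySem.List.enumerate objl k).flatMap (pvB4 rel a si sp oi)).map pvProj := by
  induction objl generalizing k acc with
  | nil => simp [PySem.List.enumerate]
  | cons b t ih =>
    rw [PySem.List.enumerate_cons, List.foldl_cons, List.flatMap_cons, List.map_append, ih (k + 1)]
    by_cases h : relGetD rel (a, b) (-1) = -1 <;>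
      simp [pvB4, h, pvProj, List.append_assoc]

lemma pv_lvl3 (rel : List (Int × Int × Int)) (a si sp scls : Int) (E2 : List (Int × Int × List Int)) (acc : List (List Int)) :
    E2.foldl (fun acc o =>
      if scls = o.2.1 then acc
      else o.2.2.foldl (fun acc b =>
        let pred := relGetD rel (a, b) (-1)
        if pred ≠ -1 then acc ++ [[si, pred, o.1]] else acc) acc) acc
    = acc ++ (E2.flatMap (pvB3 rel a si sp scls)).map pvProj := by
  induction E2 generalizing acc with
  | nil => simp
  | cons o t ih =>
    rw [List.foldl_cons, List.flatMap_cons, List.map_append, ih]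
    by_cases h : scls = o.2.1
    · simp [pvB3, h]
    · rw [if_neg h, pv_lvl4 rel a si sp o.1 o.2.2 0 acc]
      simp [pvB3, h, List.append_assoc]

lemma pv_lvl2 (obj_list : List (List Int)) (clses : List Int) (rel : List (Int × Int × Int)) (si scls : Int) (subl : List Int) (k : Int) (acc : List (List Int)) :
    subl.foldl (fun acc a =>
      (PySem.List.enumerate (clses.zip obj_list)).foldl (fun acc o =>
        if scls = o.2.1 then acc
        else o.2.2.foldl (fun acc b =>
          let pred := relGetD rel (a, b) (-1)
          if pred ≠ -1 then acc ++ [[si, pred, o.1]] else acc) acc) acc) acc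
    = acc ++ ((PySem.List.enumerate subl k).flatMap (pvB2 obj_list clses rel si scls)).map pvProj := by
  induction subl generalizing k acc with
  | nil => simp [PySem.List.enumerate]
  | cons a t ih =>
    rw [PySem.List.enumerate_cons, List.foldl_cons, List.flatMap_cons, List.map_append, ih (k + 1),
      pv_lvl3 rel a si k scls _ acc]
    simp [pvB2, List.append_assoc]

lemma pv_lvl1 (obj_list : List (List Int)) (clses : List Int) (rel : List (Int × Int × Int)) (E1 : List (Int × Int × List Int)) (acc : List (List Int)) :
    E1.foldl (fun acc s =>
      s.2.2.foldl (fun acc a =>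
        (PySem.List.enumerate (clses.zip obj_list)).foldl (fun acc o =>
          if s.2.1 = o.2.1 then acc
          else o.2.2.foldl (fun acc b =>
            let pred := relGetD rel (a, b) (-1)
            if pred ≠ -1 then acc ++ [[s.1, pred, o.1]] else acc) acc) acc) acc) acc
    = acc ++ (E1.flatMap (pvB1 obj_list clses rel)).map pvProj := by
  induction E1 generalizing acc with
  | nil => simp
  | cons s t ih =>
    rw [List.foldl_cons, List.flatMap_cons, List.map_append, ih,
      pv_lvl2 obj_list clses rel s.1 s.2.1 s.2.2 0 acc]
    simp [pvB1, List.append_assoc]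

lemma pv_A_link (obj_list : List (List Int)) (clses : List Int) (rel : List (Int × Int × Int)) :
    get_correlation obj_list clses rel = (pvT obj_list clses rel).map pvProj := by
  unfold get_correlation pvT
  rw [pv_lvl1]
  simp

-- ===== B-link: get_correlation_alt = (sorted pvCand).map pvProj =====
-- occurrences of the value v, in scan order
def pvO (obj_list : List (List Int)) (clses : List Int) (v : Int) : List (Int × Int × Int) :=
  (PySem.List.enumerate (clses.zip obj_list)).flatMap (fun s =>
    (PySem.List.enumerate s.2.2).flatMap (fun pv => if pv.2 = v then [(s.1, pv.1, s.2.1)] else []))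

def pvCand (obj_list : List (List Int)) (clses : List Int) (rel : List (Int × Int × Int)) : List (Int × Int × Int × Int × Int) :=
  rel.flatMap (fun e =>
    if e.2.2 = -1 then []
    else (pvO obj_list clses e.1).flatMap (fun s =>
      (pvO obj_list clses e.2.1).flatMap (fun o =>
        if s.2.2 ≠ o.2.2 then [(s.1, s.2.1, o.1, o.2.1, e.2.2)] else [])))

lemma pv_occ_inner (i c : Int) (l : List Int) (k : Int) (d : PySem.Dict Int (List (Int × Int × Int))) (v : Int) :
    ((PySem.List.enumerate l k).foldl (fun d pv =>
        d.insert pv.2 (d.getD pv.2 [] ++ [(i, pv.1, c)])) d).getD v []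
    = d.getD v [] ++ (PySem.List.enumerate l k).flatMap (fun pv => if pv.2 = v then [(i, pv.1, c)] else []) := by
  induction l generalizing k d with
  | nil => simp [PySem.List.enumerate]
  | cons x t ih =>
    rw [PySem.List.enumerate_cons, List.foldl_cons, List.flatMap_cons, ih,
      PySem.Dict.getD_insert]
    by_cases h : x = v
    · subst h; simp [List.append_assoc]
    · simp [h, Ne.symm h]

lemma pv_occ_outer (E0 : List (Int × Int × List Int)) (d : PySem.Dict Int (List (Int × Int × Int))) (v : Int) :
    (E0.foldl (fun d s =>
        (PySem.List.enumerate s.2.2).foldl (fun d pv =>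
          d.insert pv.2 (d.getD pv.2 [] ++ [(s.1, pv.1, s.2.1)])) d) d).getD v []
    = d.getD v [] ++ E0.flatMap (fun s =>
        (PySem.List.enumerate s.2.2).flatMap (fun pv => if pv.2 = v then [(s.1, pv.1, s.2.1)] else [])) := by
  induction E0 generalizing d with
  | nil => simp
  | cons s t ih =>
    rw [List.foldl_cons, List.flatMap_cons, ih, pv_occ_inner, List.append_assoc]

lemma pv_occ_getD (obj_list : List (List Int)) (clses : List Int) (v : Int) :
    (pvOccDict obj_list clses).getD v [] = pvO obj_list clses v := by
  unfold pvOccDict pvO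
  rw [pv_occ_outer]
  have h0 : (PySem.Dict.empty : PySem.Dict Int (List (Int × Int × Int))).getD v [] = [] := rfl
  rw [h0, List.nil_append]

lemma pv_cand_eq (obj_list : List (List Int)) (clses : List Int) (rel : List (Int × Int × Int)) :
    pvCandList obj_list clses rel = pvCand obj_list clses rel := by
  unfold pvCandList pvCand
  have hstep : ∀ (c : List (Int × Int × Int × Int × Int)) (e : Int × Int × Int),
      (if e.2.2 = -1 then c
       else ((pvOccDict obj_list clses).getD e.1 []).foldl (fun c s =>
         ((pvOccDict obj_list clses).getD e.2.1 []).foldl (fun c o =>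
           if s.2.2 ≠ o.2.2 then c ++ [(s.1, s.2.1, o.1, o.2.1, e.2.2)] else c) c) c)
      = c ++ (if e.2.2 = -1 then []
         else (pvO obj_list clses e.1).flatMap (fun s =>
           (pvO obj_list clses e.2.1).flatMap (fun o =>
             if s.2.2 ≠ o.2.2 then [(s.1, s.2.1, o.1, o.2.1, e.2.2)] else []))) := by
    intro c e
    by_cases he : e.2.2 = -1
    · simp [he]
    · rw [if_neg he, if_neg he, pv_occ_getD, pv_occ_getD]
      have hin : ∀ (c : List (Int × Int × Int × Int × Int)) (s : Int × Int × Int),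
          (pvO obj_list clses e.2.1).foldl (fun c o =>
            if s.2.2 ≠ o.2.2 then c ++ [(s.1, s.2.1, o.1, o.2.1, e.2.2)] else c) c
          = c ++ (pvO obj_list clses e.2.1).flatMap (fun o =>
              if s.2.2 ≠ o.2.2 then [(s.1, s.2.1, o.1, o.2.1, e.2.2)] else []) := by
        intro c s
        refine pv_foldl_flat _ _ (fun c o => ?_) _ _
        by_cases h : s.2.2 = o.2.2 <;> simp [h]
      rw [pv_foldl_flat _ _ hin]
  rw [pv_foldl_flat _ _ hstep rel []]
  simp

lemma pv_B_link (obj_list : List (List Int)) (clses : List Int) (rel : List (Int × Int × Int)) :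
    get_correlation_alt obj_list clses rel
    = (PySem.List.sorted (pvCand obj_list clses rel) pvKey).map pvProj := by
  unfold get_correlation_alt
  rw [pv_cand_eq]
  rfl

-- ===== pvT is strictly increasing in the sort key =====
lemma pv_klt (x y : Int × Int × Int × Int × Int) :
    pvKey x < pvKey y ↔ x.1 < y.1 ∨ (x.1 = y.1 ∧ (x.2.1 < y.2.1 ∨ (x.2.1 = y.2.1 ∧
      (x.2.2.1 < y.2.2.1 ∨ (x.2.2.1 = y.2.2.1 ∧ x.2.2.2.1 < y.2.2.2.1))))) := by
  simp [pvKey, Prod.Lex.toLex_lt_toLex]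

lemma pv_m4 {rel : List (Int × Int × Int)} {a si sp oi : Int} {qw : Int × Int}
    {x : Int × Int × Int × Int × Int} (h : x ∈ pvB4 rel a si sp oi qw) :
    x.1 = si ∧ x.2.1 = sp ∧ x.2.2.1 = oi ∧ x.2.2.2.1 = qw.1 := by
  unfold pvB4 at h
  split_ifs at h <;> simp_all

lemma pv_m3 {rel : List (Int × Int × Int)} {a si sp scls : Int} {o : Int × Int × List Int}
    {x : Int × Int × Int × Int × Int} (h : x ∈ pvB3 rel a si sp scls o) :
    x.1 = si ∧ x.2.1 = sp ∧ x.2.2.1 = o.1 := by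
  unfold pvB3 at h
  split_ifs at h
  · simp_all
  · simp only [List.mem_flatMap] at h
    obtain ⟨qw, _, hx⟩ := h
    exact ⟨(pv_m4 hx).1, (pv_m4 hx).2.1, (pv_m4 hx).2.2.1⟩

lemma pv_m2 {obj_list : List (List Int)} {clses : List Int} {rel : List (Int × Int × Int)}
    {si scls : Int} {pv : Int × Int} {x : Int × Int × Int × Int × Int}
    (h : x ∈ pvB2 obj_list clses rel si scls pv) : x.1 = si ∧ x.2.1 = pv.1 := by
  unfold pvB2 at h
  simp only [List.mem_flatMap] at h
  obtain ⟨o, _, hx⟩ := h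
  exact ⟨(pv_m3 hx).1, (pv_m3 hx).2.1⟩

lemma pv_m1 {obj_list : List (List Int)} {clses : List Int} {rel : List (Int × Int × Int)}
    {s : Int × Int × List Int} {x : Int × Int × Int × Int × Int}
    (h : x ∈ pvB1 obj_list clses rel s) : x.1 = s.1 := by
  unfold pvB1 at h
  simp only [List.mem_flatMap] at h
  obtain ⟨pv, _, hx⟩ := h
  exact (pv_m2 hx).1

lemma pv_p4 (rel : List (Int × Int × Int)) (a si sp oi : Int) (objl : List Int) (k : Int) :
    List.Pairwise (fun x y => pvKey x < pvKey y)
      ((PySem.List.enumerate objl k).flatMap (pvB4 rel a si sp oi)) := by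
  rw [List.pairwise_flatMap]
  refine ⟨fun qw _ => ?_, (PySem.List.pairwise_lt_enumerate objl k).imp ?_⟩
  · unfold pvB4; split_ifs <;> simp
  · intro p q hpq x hx y hy
    obtain ⟨h1, h2, h3, h4⟩ := pv_m4 hx
    obtain ⟨g1, g2, g3, g4⟩ := pv_m4 hy
    rw [pv_klt]; omega

lemma pv_p3 (obj_list : List (List Int)) (clses : List Int) (rel : List (Int × Int × Int)) (a si sp scls : Int) :
    List.Pairwise (fun x y => pvKey x < pvKey y)
      ((PySem.List.enumerate (clses.zip obj_list)).flatMap (pvB3 rel a si sp scls)) := by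
  rw [List.pairwise_flatMap]
  refine ⟨fun o _ => ?_, (PySem.List.pairwise_lt_enumerate (clses.zip obj_list) 0).imp ?_⟩
  · unfold pvB3
    split_ifs
    · exact List.Pairwise.nil
    · exact pv_p4 rel a si sp o.1 o.2.2 0
  · intro p q hpq x hx y hy
    obtain ⟨h1, h2, h3⟩ := pv_m3 hx
    obtain ⟨g1, g2, g3⟩ := pv_m3 hy
    rw [pv_klt]; omega

lemma pv_p2 (obj_list : List (List Int)) (clses : List Int) (rel : List (Int × Int × Int)) (si scls : Int) (subl : List Int) (k : Int) :
    List.Pairwise (fun x y => pvKey x < pvKey y)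
      ((PySem.List.enumerate subl k).flatMap (pvB2 obj_list clses rel si scls)) := by
  rw [List.pairwise_flatMap]
  refine ⟨fun pv _ => pv_p3 obj_list clses rel pv.2 si pv.1 scls,
    (PySem.List.pairwise_lt_enumerate subl k).imp ?_⟩
  intro p q hpq x hx y hy
  obtain ⟨h1, h2⟩ := pv_m2 hx
  obtain ⟨g1, g2⟩ := pv_m2 hy
  rw [pv_klt]; omega

lemma pv_pT (obj_list : List (List Int)) (clses : List Int) (rel : List (Int × Int × Int)) :
    List.Pairwise (fun x y => pvKey x < pvKey y) (pvT obj_list clses rel) := by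
  unfold pvT
  rw [List.pairwise_flatMap]
  refine ⟨fun s _ => pv_p2 obj_list clses rel s.1 s.2.1 s.2.2 0,
    (PySem.List.pairwise_lt_enumerate (clses.zip obj_list) 0).imp ?_⟩
  intro p q hpq x hx y hy
  have h1 := pv_m1 hx
  have g1 := pv_m1 hy
  rw [pv_klt]; omega

-- ===== pvCand is a permutation of pvT =====
def pvPos (obj_list : List (List Int)) (clses : List Int) : List (Int × Int × Int × Int) :=
  (PySem.List.enumerate (clses.zip obj_list)).flatMap (fun s =>
    (PySem.List.enumerate s.2.2).map (fun pv => (s.1, pv.1, s.2.1, pv.2)))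

def pvH (e : Int × Int × Int) (u w : Int × Int × Int × Int) : List (Int × Int × Int × Int × Int) :=
  if e.2.2 = -1 then []
  else if u.2.2.2 = e.1 ∧ w.2.2.2 = e.2.1 ∧ u.2.2.1 ≠ w.2.2.1 then
    [(u.1, u.2.1, w.1, w.2.1, e.2.2)] else []

def pvBody (rel : List (Int × Int × Int)) (u w : Int × Int × Int × Int) : List (Int × Int × Int × Int × Int) :=
  if u.2.2.1 = w.2.2.1 then []
  else if relGetD rel (u.2.2.2, w.2.2.2) (-1) ≠ -1 then
    [(u.1, u.2.1, w.1, w.2.1, relGetD rel (u.2.2.2, w.2.2.2) (-1))] else []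

lemma pv_pos_flatMap {γ : Type} (obj_list : List (List Int)) (clses : List Int)
    (g : (Int × Int × Int × Int) → List γ) :
    (pvPos obj_list clses).flatMap g
    = (PySem.List.enumerate (clses.zip obj_list)).flatMap (fun s =>
        (PySem.List.enumerate s.2.2).flatMap (fun pv => g (s.1, pv.1, s.2.1, pv.2))) := by
  unfold pvPos
  rw [List.flatMap_assoc]
  simp only [List.flatMap_map]

lemma pv_filter_flatMap {α β γ : Type} (l : List α) (c : α → Prop) [DecidablePred c]
    (f : α → β) (g : β → List γ) :
    (l.flatMap (fun u => if c u then [f u] else [])).flatMap g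
    = l.flatMap (fun u => if c u then g (f u) else []) := by
  rw [List.flatMap_assoc]
  congr 1; funext u; split <;> simp

lemma pv_O_pos (obj_list : List (List Int)) (clses : List Int) (v : Int) :
    pvO obj_list clses v
    = (pvPos obj_list clses).flatMap (fun u => if u.2.2.2 = v then [(u.1, u.2.1, u.2.2.1)] else []) := by
  rw [pv_pos_flatMap]
  rfl

lemma pv_cand_pos (obj_list : List (List Int)) (clses : List Int) (rel : List (Int × Int × Int)) :
    pvCand obj_list clses rel
    = rel.flatMap (fun e => (pvPos obj_list clses).flatMap (fun u =>
        (pvPos obj_list clses).flatMap (fun w => pvH e u w))) := by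
  unfold pvCand; congr 1; funext e
  by_cases he : e.2.2 = -1
  · simp [pvH, he]
  · rw [if_neg he, pv_O_pos obj_list clses e.1, pv_filter_flatMap]
    congr 1; funext u
    by_cases hu : u.2.2.2 = e.1
    · rw [if_pos hu, pv_O_pos obj_list clses e.2.1, pv_filter_flatMap]
      congr 1; funext w
      by_cases hw : w.2.2.2 = e.2.1 <;> by_cases hc : u.2.2.1 = w.2.2.1 <;>
        simp [pvH, he, hu, hw, hc]
    · rw [if_neg hu]
      simp [pvH, he, hu]

lemma pv_T_pos (obj_list : List (List Int)) (clses : List Int) (rel : List (Int × Int × Int)) :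
    pvT obj_list clses rel
    = (pvPos obj_list clses).flatMap (fun u =>
        (pvPos obj_list clses).flatMap (fun w => pvBody rel u w)) := by
  rw [pv_pos_flatMap]
  unfold pvT pvB1; congr 1; funext s; congr 1; funext pv
  rw [pv_pos_flatMap]
  unfold pvB2; congr 1; funext o
  unfold pvB3 pvBody pvB4
  by_cases h : s.2.1 = o.2.1
  · simp [h]
  · rw [if_neg h]
    congr 1
    funext qw
    simp [h]

lemma pv_lookup (rel : List (Int × Int × Int)) (hnd : (rel.map (fun e => (e.1, e.2.1))).Nodup)
    (u w : Int × Int × Int × Int) :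
    rel.flatMap (fun e => pvH e u w) = pvBody rel u w := by
  induction rel with
  | nil => simp [pvBody, relGetD]
  | cons e0 r ih =>
    rw [List.map_cons, List.nodup_cons] at hnd
    obtain ⟨hk0, hr⟩ := hnd
    rw [List.flatMap_cons]
    by_cases hk : (e0.1, e0.2.1) = (u.2.2.2, w.2.2.2)
    · have hrest : r.flatMap (fun e => pvH e u w) = [] := by
        rw [List.flatMap_eq_nil_iff]
        intro e he
        have : (e.1, e.2.1) ≠ (u.2.2.2, w.2.2.2) := by
          intro hc
          exact hk0 (by rw [← hc] at hk; rw [hk]; exact List.mem_map_of_mem he)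
        unfold pvH
        split_ifs with h1 h2
        · rfl
        · exact absurd (by rw [← h2.1, ← h2.2.1]) this
        · rfl
      rw [hrest, List.append_nil]
      have hget : relGetD (e0 :: r) (u.2.2.2, w.2.2.2) (-1) = e0.2.2 := by
        unfold relGetD
        rw [List.find?_cons_of_pos (by simp [hk])]
      obtain ⟨hu', hw'⟩ := Prod.mk.injEq _ _ _ _ ▸ hk
      have hu : u.2.2.2 = e0.1 := hu'.symm
      have hw : w.2.2.2 = e0.2.1 := hw'.symm
      unfold pvH pvBody
      rw [hget]
      by_cases hp : e0.2.2 = -1 <;> by_cases hc : u.2.2.1 = w.2.2.1 <;>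
        simp [hp, hc, hu, hw]
    · have h0 : pvH e0 u w = [] := by
        unfold pvH
        split_ifs with h1 h2
        · rfl
        · exact absurd (by rw [← h2.1, ← h2.2.1]) hk
        · rfl
      have hget : relGetD (e0 :: r) (u.2.2.2, w.2.2.2) (-1)
          = relGetD r (u.2.2.2, w.2.2.2) (-1) := by
        unfold relGetD
        rw [List.find?_cons_of_neg (by simp [hk])]
      rw [h0, List.nil_append, ih hr]
      unfold pvBody
      rw [hget]

lemma pv_flatMap_comm {α β γ : Type} (l1 : List α) (l2 : List β) (f : α → β → List γ) :
    (l1.flatMap (fun a => l2.flatMap (f a))).Perm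
      (l2.flatMap (fun b => l1.flatMap (fun a => f a b))) := by
  induction l1 with
  | nil => simp
  | cons a t ih =>
    rw [List.flatMap_cons]
    exact (List.Perm.append_left _ ih).trans (List.flatMap_append_perm l2 (f a) _)

lemma pv_perm (obj_list : List (List Int)) (clses : List Int) (rel : List (Int × Int × Int))
    (hnd : (rel.map (fun e => (e.1, e.2.1))).Nodup) :
    (pvT obj_list clses rel).Perm (pvCand obj_list clses rel) := by
  rw [pv_cand_pos, pv_T_pos]
  refine List.Perm.trans ?_ (pv_flatMap_comm rel (pvPos obj_list clses) _).symm
  refine List.Perm.flatMap_left _ (fun u _ => ?_)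
  refine List.Perm.trans ?_ (pv_flatMap_comm rel (pvPos obj_list clses) _).symm
  refine List.Perm.flatMap_left _ (fun w _ => ?_)
  rw [pv_lookup rel hnd u w]

-- ===== VERDICT (by name: the statement is the Claim_ definition above) =====
theorem get_correlation_spec : Claim_equal_get_correlation := by
  intro obj_list clses rel_list _ hpre
  unfold Spec_get_correlation
  rw [pv_A_link, pv_B_link]
  congr 1
  exact (PySem.List.sorted_eq_of_perm_of_pairwise_lt _ _ pvKey
    (pv_perm obj_list clses rel_list hpre) (pv_pT obj_list clses rel_list)).symm
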